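-- pv_equiv track=rewrite | github.com/RainbowDragon/ACSL | Python/Contest 3/2022 - 2023/CreateATreeSenior.py | postorder
-- ===== SOURCE A (Python) =====
-- def postorder(letters, values, left, right, level):
--     found = False
--     index = left
--     while index <= right:
--         if values[index] == level:
--             found = True
--             break
--         index += 1
--
--     if not found:
--         return ""
--
--     left_str = postorder(letters, values, left, index - 1, level + 1)
--     right_str = postorder(letters, values, index + 1, right, level + 1)
--
--     return left_str + right_str + letters[index]
-- ===== SOURCE B (Python) =====
-- def postorder(letters, values, left, right, level):
--     out = []
--     stack = [(left, right, level)]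
--     while stack:
--         l, r, lvl = stack.pop()
--         idx = next((i for i in range(l, r + 1) if values[i] == lvl), None)
--         if idx is None:
--             continue
--         out.append(letters[idx])
--         stack.append((l, idx - 1, lvl + 1))
--         stack.append((idx + 1, r, lvl + 1))
--     return "".join(reversed(out))
-- ===== Notes on version B (the rewrite author's own statement) =====
-- stated objective: alternative
-- what changed: B replaces A's recursion (scan for the level, recurse on the two sub-ranges, concatenate) by an explicit work-list stack that emits each found node's letter root-first and reverses the collected letters once at the end.
-- outside the precondition, e.g. on postorder(['a'], [5, 6], 0, 1, 1): A returns '', B returns ''; on postorder(['c', 'a', 'a'], [1, 0, 0, 0, 0, 3], -5, 5, 3): A returns 'a', B returns 'a'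
import Mathlib
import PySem

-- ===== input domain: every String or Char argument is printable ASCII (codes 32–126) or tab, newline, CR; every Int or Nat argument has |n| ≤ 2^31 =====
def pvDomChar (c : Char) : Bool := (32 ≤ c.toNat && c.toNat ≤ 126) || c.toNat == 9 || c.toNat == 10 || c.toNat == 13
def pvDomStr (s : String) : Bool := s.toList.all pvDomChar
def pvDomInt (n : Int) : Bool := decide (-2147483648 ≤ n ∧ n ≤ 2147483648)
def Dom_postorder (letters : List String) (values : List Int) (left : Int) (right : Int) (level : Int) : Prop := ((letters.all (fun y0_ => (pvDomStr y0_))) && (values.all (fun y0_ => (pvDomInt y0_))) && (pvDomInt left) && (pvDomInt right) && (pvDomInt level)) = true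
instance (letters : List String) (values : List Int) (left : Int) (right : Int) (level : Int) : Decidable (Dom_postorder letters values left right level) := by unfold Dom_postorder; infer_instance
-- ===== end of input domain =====

-- B replaces A's recursion by an explicit work-list stack that emits node letters root-first and
-- reverses the collected letters at the end (objective: alternative decomposition, same cost).
-- Loops/recursions are ported as structural recursion on an explicit fuel counter that is exactly
-- the number of remaining iterations (the fuel never runs out early, so behaviour is unchanged).

-- ===== PORT A =====
-- A's scanning while-loop ('while index <= right: …'); fuel = (right + 1 - index).toNat is exactly
-- the number of remaining loop tests, so fuel 0 ↔ index > right.  Returns the first index with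
-- values[index] == level (none both when the scan runs off the right end and when Python would
-- raise IndexError — the latter is excluded by Pre_).
def scanAGo (values : List Int) (level : Int) : Nat → Int → Option Int
  | 0, _ => none
  | n + 1, index =>
    match PySem.List.pyGet? values index with
    | none => none   -- Python raises IndexError here (excluded by Pre_)
    | some v => if v = level then some index else scanAGo values level n (index + 1)

def scanA (values : List Int) (level : Int) (index right : Int) : Option Int :=
  scanAGo values level ((right + 1 - index).toNat) index

-- A's recursion; fuel = size of the range [left, right]; both sub-ranges are strictly smaller, so
-- fuel (size - 1) suffices for them, and at fuel 0 the range is empty and A returns "".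
def postGo (letters : List String) (values : List Int) : Nat → Int → Int → Int → String
  | 0, _, _, _ => ""   -- empty range: the scan finds nothing and A returns ""
  | n + 1, l, r, lvl =>
    match scanA values lvl l r with
    | none => ""
    | some idx =>
        postGo letters values n l (idx - 1) (lvl + 1) ++
        postGo letters values n (idx + 1) r (lvl + 1) ++
        (PySem.List.pyGet? letters idx).getD ""   -- letters[index]; Python's IndexError is excluded by Pre_

def postorder (letters : List String) (values : List Int) (left : Int) (right : Int) (level : Int) : String :=
  postGo letters values ((right + 1 - left).toNat) left right level

-- ===== PORT B =====
-- B's inner generator: first i in range(l, r+1) with values[i] == lvl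
def scanB (values : List Int) (lvl l r : Int) : Option Int :=
  (PySem.List.pyRange l (r + 1) 1).find? (fun i => PySem.List.pyGetD values i 0 == lvl)

-- fuel bound for one stack entry (l, r, lvl): 2*size + 1 bounds the number of pops it generates
def msrB (t : Int × Int × Int) : Nat := 2 * (t.2.1 + 1 - t.1).toNat + 1

-- B's while-loop: pop a range, emit its root letter, push the two sub-ranges; fuel bounds the
-- number of iterations (each pop strictly decreases the total entry measure, so it never runs out).
def loopGo (letters : List String) (values : List Int) :
    Nat → List (Int × Int × Int) → List String → List String
  | _, [], out => out
  | 0, _, out => out   -- fuel exhausted: unreachable for the fuel postorder_alt supplies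
  | n + 1, (l, r, lvl) :: rest, out =>
    match scanB values lvl l r with
    | none => loopGo letters values n rest out
    | some idx =>
        loopGo letters values n ((idx + 1, r, lvl + 1) :: (l, idx - 1, lvl + 1) :: rest)
          (out ++ [(PySem.List.pyGet? letters idx).getD ""])

def postorder_alt (letters : List String) (values : List Int) (left : Int) (right : Int) (level : Int) : String :=
  PySem.Str.join ""
    ((loopGo letters values (msrB (left, right, level)) [(left, right, level)] []).reverse)

-- ===== PRECONDITION & SPEC =====
-- Pre_ excludes exactly the calls whose scanned index range can reach outside values or letters,
-- where Python's A raises IndexError (it is slightly conservative about letters: when no value in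
-- the range equals the level, A returns "" without ever touching letters — see the cited examples).
def Pre_postorder (letters : List String) (values : List Int) (left : Int) (right : Int) (level : Int) : Prop :=
  right < left ∨
    (-(values.length : Int) ≤ left ∧ right < values.length ∧
     -(letters.length : Int) ≤ left ∧ right < letters.length)
instance (letters : List String) (values : List Int) (left : Int) (right : Int) (level : Int) : Decidable (Pre_postorder letters values left right level) := by unfold Pre_postorder; infer_instance

def pvWitness_postorder : List String × List Int × Int × Int × Int :=
  (["a", "b", "c"], [1, 2, 2], 0, 2, 1)

def Spec_postorder (letters : List String) (values : List Int) (left : Int) (right : Int) (level : Int) (out : String) : Prop := out = postorder_alt letters values left right level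
instance (letters : List String) (values : List Int) (left : Int) (right : Int) (level : Int) (out : String) : Decidable (Spec_postorder letters values left right level out) := by unfold Spec_postorder; infer_instance

-- ===== CLAIM (what is proved, stated in full; the proofs are below) =====
def Claim_equal_postorder : Prop := ∀ (letters : List String) (values : List Int) (left : Int) (right : Int) (level : Int), Dom_postorder letters values left right level → Pre_postorder letters values left right level → Spec_postorder letters values left right level (postorder letters values left right level)

-- ===== LEMMAS AND PROOFS =====

theorem scanB_le (values : List Int) (lvl l r idx : Int)
    (h : scanB values lvl l r = some idx) : l ≤ idx ∧ idx ≤ r := by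
  have hm := List.mem_of_find?_eq_some h
  have := (PySem.List.mem_pyRange_one).1 hm
  omega

-- the letters one stack entry contributes, in the order loopGo appends them (fueled like postGo)
def partsGo (letters : List String) (values : List Int) : Nat → Int → Int → Int → List String
  | 0, _, _, _ => []
  | n + 1, l, r, lvl =>
    match scanB values lvl l r with
    | none => []
    | some idx =>
        (PySem.List.pyGet? letters idx).getD "" ::
          (partsGo letters values n (idx + 1) r (lvl + 1) ++ partsGo letters values n l (idx - 1) (lvl + 1))

-- partsGo at canonical fuel
def partsT (letters : List String) (values : List Int) (l r lvl : Int) : List String :=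
  partsGo letters values ((r + 1 - l).toNat) l r lvl

theorem scanB_none_of_empty (values : List Int) (lvl l r : Int) (h : r < l) :
    scanB values lvl l r = none := by
  unfold scanB
  rw [PySem.List.pyRange_one_eq_nil (by omega)]
  rfl

theorem partsGo_fuel (letters : List String) (values : List Int) :
    ∀ (n : Nat) (l r lvl : Int), (r + 1 - l).toNat ≤ n →
      partsGo letters values n l r lvl = partsT letters values l r lvl := by
  intro n
  induction n using Nat.strong_induction_on with
  | _ n ih =>
    intro l r lvl hle
    cases hsz : (r + 1 - l).toNat with
    | zero =>
      have hr : r < l := by omega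
      have h0 : partsT letters values l r lvl = [] := by simp [partsT, hsz, partsGo]
      rw [h0]
      cases n with
      | zero => rfl
      | succ m => simp [partsGo, scanB_none_of_empty values lvl l r hr]
    | succ m =>
      cases n with
      | zero => omega
      | succ n' =>
        simp only [partsT, hsz, partsGo]
        cases hscan : scanB values lvl l r with
        | none => rfl
        | some idx =>
          have hb := scanB_le values lvl l r idx hscan
          dsimp only
          rw [ih n' (by omega) (idx + 1) r (lvl + 1) (by omega),
              ih n' (by omega) l (idx - 1) (lvl + 1) (by omega),
              ih m (by omega) (idx + 1) r (lvl + 1) (by omega),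
              ih m (by omega) l (idx - 1) (lvl + 1) (by omega)]

theorem partsT_none (letters : List String) (values : List Int) (l r lvl : Int)
    (hscan : scanB values lvl l r = none) : partsT letters values l r lvl = [] := by
  cases hsz : (r + 1 - l).toNat with
  | zero => simp [partsT, hsz, partsGo]
  | succ m => simp [partsT, hsz, partsGo, hscan]

theorem partsT_some (letters : List String) (values : List Int) (l r lvl idx : Int)
    (hscan : scanB values lvl l r = some idx) :
    partsT letters values l r lvl =
      (PySem.List.pyGet? letters idx).getD "" ::
        (partsT letters values (idx + 1) r (lvl + 1) ++ partsT letters values l (idx - 1) (lvl + 1)) := by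
  have hb := scanB_le values lvl l r idx hscan
  cases hsz : (r + 1 - l).toNat with
  | zero => omega
  | succ m =>
    simp only [partsT, hsz, partsGo, hscan]
    rw [partsGo_fuel letters values m (idx + 1) r (lvl + 1) (by omega),
        partsGo_fuel letters values m l (idx - 1) (lvl + 1) (by omega)]
    simp only [partsT]

theorem loopGo_spec (letters : List String) (values : List Int) :
    ∀ (n : Nat) (stack : List (Int × Int × Int)) (out : List String),
      (stack.map msrB).sum ≤ n →
      loopGo letters values n stack out =
        out ++ (stack.map (fun t => partsT letters values t.1 t.2.1 t.2.2)).flatten := by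
  intro n
  induction n using Nat.strong_induction_on with
  | _ n ih =>
    intro stack out hle
    cases stack with
    | nil =>
      cases n <;> simp [loopGo]
    | cons t rest =>
      obtain ⟨l, r, lvl⟩ := t
      cases n with
      | zero => simp [msrB] at hle
      | succ n' =>
        simp only [loopGo]
        cases hscan : scanB values lvl l r with
        | none =>
          dsimp only
          rw [ih n' (by omega) rest out (by simp [msrB] at hle ⊢; omega)]
          simp [partsT_none letters values l r lvl hscan]
        | some idx =>
          have hb := scanB_le values lvl l r idx hscan
          dsimp only
          rw [ih n' (by omega) ((idx + 1, r, lvl + 1) :: (l, idx - 1, lvl + 1) :: rest)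
                (out ++ [(PySem.List.pyGet? letters idx).getD ""])
                (by simp [msrB] at hle ⊢; omega)]
          simp [partsT_some letters values l r lvl idx hscan]

theorem scan_eq (values : List Int) (level : Int) :
    ∀ (n : Nat) (i r : Int), (r + 1 - i).toNat = n →
      ((-(values.length : Int) ≤ i ∧ r < values.length) ∨ r < i) →
      scanAGo values level n i = scanB values level i r := by
  intro n
  induction n with
  | zero =>
    intro i r h0 _
    rw [scanB_none_of_empty values level i r (by omega)]
    rfl
  | succ n ih =>
    intro i r hn hg
    have hir : i ≤ r := by omega
    simp only [scanAGo]
    cases hv : PySem.List.pyGet? values i with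
    | none =>
      exfalso
      rw [PySem.List.pyGet?_eq_none_iff] at hv
      apply hv
      unfold PySem.Raise.InRange
      omega
    | some v =>
      unfold scanB
      rw [PySem.List.pyRange_one_cons (by omega)]
      by_cases hvl : v = level
      · simp [List.find?, PySem.List.pyGetD, hv, hvl]
      · have hpred : (PySem.List.pyGetD values i 0 == level) = false := by
          simp [PySem.List.pyGetD, hv]
          exact hvl
        simp only [List.find?, hpred]
        have h2 := ih (i + 1) r (by omega) (by omega)
        unfold scanB at h2
        simp [hvl, h2]

theorem interc_nil {α : Type} (xs : List (List α)) : ([] : List α).intercalate xs = xs.flatten := by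
  induction xs with
  | nil => rfl
  | cons h t ih =>
    cases t with
    | nil => simp [List.intercalate]
    | cons h2 t2 =>
      simp [List.intercalate] at ih ⊢
      simpa using ih

theorem join_empty_nil : PySem.Str.join "" ([] : List String) = "" := rfl

theorem join_empty_cons (s : String) (xs : List String) :
    PySem.Str.join "" (s :: xs) = s ++ PySem.Str.join "" xs := by
  simp [PySem.Str.join, PySem.Chars.join, interc_nil]

theorem join_empty_append (xs ys : List String) :
    PySem.Str.join "" (xs ++ ys) = PySem.Str.join "" xs ++ PySem.Str.join "" ys := by
  induction xs with
  | nil => simp [PySem.Str.join, PySem.Chars.join, interc_nil]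
  | cons s t ih => simp [join_empty_cons, ih, String.append_assoc]

theorem post_eq (letters : List String) (values : List Int) :
    ∀ (n : Nat) (l r lvl : Int), (r + 1 - l).toNat ≤ n →
      ((-(values.length : Int) ≤ l ∧ r < values.length) ∨ r < l) →
      postGo letters values n l r lvl =
        PySem.Str.join "" (partsT letters values l r lvl).reverse := by
  intro n
  induction n using Nat.strong_induction_on with
  | _ n ih =>
    intro l r lvl hle hgood
    cases n with
    | zero =>
      have hr : r < l := by omega
      rw [partsT_none letters values l r lvl (scanB_none_of_empty values lvl l r hr)]
      rfl
    | succ n' =>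
      have hseq : scanA values lvl l r = scanB values lvl l r :=
        scan_eq values lvl ((r + 1 - l).toNat) l r rfl hgood
      simp only [postGo, scanA] at hseq ⊢
      rw [hseq]
      cases hscan : scanB values lvl l r with
      | none =>
        rw [partsT_none letters values l r lvl hscan]
        rfl
      | some idx =>
        have hb := scanB_le values lvl l r idx hscan
        have hgood' : -(values.length : Int) ≤ l ∧ r < values.length := by
          rcases hgood with h | h
          · exact h
          · omega
        dsimp only
        rw [ih n' (by omega) l (idx - 1) (lvl + 1) (by omega) (by left; constructor <;> omega)]
        rw [ih n' (by omega) (idx + 1) r (lvl + 1) (by omega) (by left; constructor <;> omega)]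
        rw [partsT_some letters values l r lvl idx hscan]
        simp [join_empty_append, join_empty_cons, join_empty_nil, String.append_assoc,
          String.append_empty]

-- ===== VERDICT (by name: the statement is the Claim_ definition above) =====
theorem postorder_spec : Claim_equal_postorder := by
  intro letters values left right level _hdom hpre
  unfold Spec_postorder postorder_alt postorder
  rw [loopGo_spec letters values _ [(left, right, level)] [] (by simp [msrB])]
  simp only [List.map_cons, List.map_nil, List.flatten, List.nil_append]
  rw [show (partsT letters values left right level).append [] = partsT letters values left right level from List.append_nil _]
  exact post_eq letters values ((right + 1 - left).toNat) left right level le_rfl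
    (by unfold Pre_postorder at hpre; omega)
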